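-- pv_equiv track=rewrite | github.com/AFulvio1/PythonHW | HW6obb/program01.py | trova_griglia
-- ===== SOURCE A (Python) =====
-- def trova_griglia(img, verde, k):
--     cont = 0
--     ascisse = []
--     ordinate = []
--     for i,e in enumerate(img):
--         if verde in e and cont == 0:
--             a = e.index(verde)
--             vertice = [i,a]
--             cont += 1
--         elif verde in e and cont == 1:
--             step = len(img[vertice[0]:i])
--             width = step*k
--             break
--         else:
--             continue
--     y_corr,x_corr = vertice[0],vertice[1]
--     for x in range(x_corr, len(img[y_corr]), step):
--         if img[y_corr][x] == verde and x+width < len(img[y_corr]):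
--             ascisse.append(x)
--     for y in range(y_corr, len(img), step):
--         if img[y][x_corr] == verde and y+width < len(img):
--             ordinate.append(y)
--     return ascisse,ordinate,y_corr,x_corr,step,width
-- ===== SOURCE B (Python) =====
-- def trova_griglia(img, verde, k):
--     marker = (i for i, row in enumerate(img) if verde in row)
--     y_corr = next(marker)
--     step = next(marker) - y_corr
--     x_corr = img[y_corr].index(verde)
--     width = step * k
--     row = img[y_corr]
--     ascisse = [x for x, v in enumerate(row)
--                if x >= x_corr and (x - x_corr) % step == 0
--                and v == verde and x + width < len(row)]
--     ordinate = [y for y, r in enumerate(img)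
--                 if y >= y_corr and (y - y_corr) % step == 0
--                 and r[x_corr] == verde and y + width < len(img)]
--     return ascisse, ordinate, y_corr, x_corr, step, width
-- ===== Notes on version B (the rewrite author's own statement) =====
-- stated objective: alternative
-- what changed: The counter+break state machine becomes a lazy generator consumed twice for the first two marker rows, and both strided sampling loops are replaced by single full enumerations filtered by a modular-arithmetic congruence ((x - x_corr) % step == 0) instead of jumping by step.
import Mathlib
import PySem

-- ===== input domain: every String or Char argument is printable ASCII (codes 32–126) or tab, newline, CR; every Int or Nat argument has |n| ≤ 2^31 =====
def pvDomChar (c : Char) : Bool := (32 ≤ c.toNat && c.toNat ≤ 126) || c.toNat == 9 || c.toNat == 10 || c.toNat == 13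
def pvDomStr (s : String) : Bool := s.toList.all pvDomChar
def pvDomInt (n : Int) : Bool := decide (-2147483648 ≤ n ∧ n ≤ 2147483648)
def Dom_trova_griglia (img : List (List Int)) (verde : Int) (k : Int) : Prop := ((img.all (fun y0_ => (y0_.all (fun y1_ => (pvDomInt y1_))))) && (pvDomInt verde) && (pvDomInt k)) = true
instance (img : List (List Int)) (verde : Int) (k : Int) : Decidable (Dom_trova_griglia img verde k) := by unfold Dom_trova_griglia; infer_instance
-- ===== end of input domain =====

-- B replaces A's counter+break state machine by a lazy two-marker scan and replaces both
-- strided sampling loops by single full enumerations filtered with modular arithmetic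
-- (objective: alternative decomposition, same asymptotic cost).


-- ===== PORT A =====
-- first `for i,e in enumerate(img)` loop of A: state = (cont, vertice);
-- returns (vertice, step) — `none` = the corresponding Python name was never bound (NameError, outside Pre_).
def pvA_first (img : List (List Int)) (verde : Int) :
    List (Int × List Int) → Int → Option (Int × Int) → Option (Int × Int) × Option Int
  | [], _, vert => (vert, none)
  | (i, e) :: rest, cont, vert =>
    if verde ∈ e ∧ cont = 0 then
      -- a = e.index(verde); vertice = [i, a]; cont += 1
      pvA_first img verde rest (cont + 1) (some (i, ((PySem.List.index? e verde).getD 0 : Nat)))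
    else if verde ∈ e ∧ cont = 1 then
      -- step = len(img[vertice[0]:i]); break   (width = step*k is recomputed by the caller)
      (vert, some ((PySem.List.slice img (some (vert.getD (0, 0)).1) (some i)).length : Int))
    else
      pvA_first img verde rest cont vert

def trova_griglia (img : List (List Int)) (verde : Int) (k : Int) : List Int × List Int × Int × Int × Int × Int :=
  match pvA_first img verde (PySem.List.enumerate img 0) 0 none with
  | (some (y_corr, x_corr), some step) =>
    let width := step * k
    let ascisse := (PySem.List.pyRange x_corr ((PySem.List.pyGetD img y_corr []).length : Int) step).foldl
      (fun acc x => if PySem.List.pyGetD (PySem.List.pyGetD img y_corr []) x 0 = verde ∧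
                       x + width < ((PySem.List.pyGetD img y_corr []).length : Int)
                    then acc ++ [x] else acc) []
    let ordinate := (PySem.List.pyRange y_corr (img.length : Int) step).foldl
      (fun acc y => if PySem.List.pyGetD (PySem.List.pyGetD img y []) x_corr 0 = verde ∧
                       y + width < (img.length : Int)
                    then acc ++ [y] else acc) []
    (ascisse, ordinate, y_corr, x_corr, step, width)
  | _ => ([], [], 0, 0, 0, 0)   -- Python: NameError (fewer than two marker rows) — outside Pre_

-- ===== PORT B =====
-- `marker` generator consumed twice = first two elements of the filtered enumeration.
def trova_griglia_alt (img : List (List Int)) (verde : Int) (k : Int) : List Int × List Int × Int × Int × Int × Int :=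
  match ((PySem.List.enumerate img 0).filter (fun p => decide (verde ∈ p.2))).map (·.1) with
  | y_corr :: y1 :: _ =>
    let step := y1 - y_corr
    let x_corr : Int := ((PySem.List.index? (PySem.List.pyGetD img y_corr []) verde).getD 0 : Nat)
    let width := step * k
    let row := PySem.List.pyGetD img y_corr []
    let ascisse := ((PySem.List.enumerate row 0).filter
      (fun p => decide (x_corr ≤ p.1 ∧ PySem.Int.mod (p.1 - x_corr) step = 0 ∧
                        p.2 = verde ∧ p.1 + width < (row.length : Int)))).map (·.1)
    let ordinate := ((PySem.List.enumerate img 0).filter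
      (fun p => decide (y_corr ≤ p.1 ∧ PySem.Int.mod (p.1 - y_corr) step = 0 ∧
                        PySem.List.pyGetD p.2 x_corr 0 = verde ∧ p.1 + width < (img.length : Int)))).map (·.1)
    (ascisse, ordinate, y_corr, x_corr, step, width)
  | _ => ([], [], 0, 0, 0, 0)   -- Python: StopIteration on next(marker) — outside Pre_

-- ===== PRECONDITION & SPEC =====
-- the indices of the rows of img that contain verde
def pvMarkerRows (img : List (List Int)) (verde : Int) : List Int :=
  ((PySem.List.enumerate img 0).filter (fun p => decide (verde ∈ p.2))).map (·.1)

-- Pre_ excludes exactly the inputs on which the Python A raises: fewer than two rows containing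
-- verde (NameError: vertice/step unbound), or some sampled row img[y] too short for img[y][x_corr]
-- (IndexError in the last loop).  B raises there too (StopIteration / IndexError).
def Pre_trova_griglia (img : List (List Int)) (verde : Int) (k : Int) : Prop :=
  2 ≤ (pvMarkerRows img verde).length ∧
  ∀ y ∈ PySem.List.pyRange ((pvMarkerRows img verde).getD 0 0) (img.length : Int)
        ((pvMarkerRows img verde).getD 1 0 - (pvMarkerRows img verde).getD 0 0),
    ((PySem.List.index? (PySem.List.pyGetD img ((pvMarkerRows img verde).getD 0 0) []) verde).getD 0 : Int)
      < ((PySem.List.pyGetD img y []).length : Int)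
instance (img : List (List Int)) (verde : Int) (k : Int) : Decidable (Pre_trova_griglia img verde k) := by
  unfold Pre_trova_griglia; infer_instance

def pvWitness_trova_griglia : List (List Int) × Int × Int :=
  ([[0, 5, 0], [0, 0, 0], [0, 5, 0], [0, 0, 0], [0, 5, 0]], 5, 1)

def Spec_trova_griglia (img : List (List Int)) (verde : Int) (k : Int) (out : List Int × List Int × Int × Int × Int × Int) : Prop := out = trova_griglia_alt img verde k
instance (img : List (List Int)) (verde : Int) (k : Int) (out : List Int × List Int × Int × Int × Int × Int) : Decidable (Spec_trova_griglia img verde k out) := by unfold Spec_trova_griglia; infer_instance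

-- ===== CLAIM (what is proved, stated in full; the proofs are below) =====
def Claim_equal_trova_griglia : Prop := ∀ (img : List (List Int)) (verde : Int) (k : Int), Dom_trova_griglia img verde k → Pre_trova_griglia img verde k → Spec_trova_griglia img verde k (trova_griglia img verde k)

-- ===== LEMMAS AND PROOFS =====

-- A's first loop in state cont = 1 (vertex already found): it scans for the next marker row.
theorem pvA_first_state1 (img : List (List Int)) (verde : Int) (l : List (Int × List Int))
    (v : Int × Int) :
    pvA_first img verde l 1 (some v) =
      match l.filter (fun p => decide (verde ∈ p.2)) with
      | [] => (some v, none)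
      | q :: _ => (some v, some ((PySem.List.slice img (some v.1) (some q.1)).length : Int)) := by
  induction l with
  | nil => simp [pvA_first]
  | cons h rest ih =>
    obtain ⟨i, e⟩ := h
    by_cases hv : verde ∈ e
    · simp [pvA_first, hv]
    · simp [pvA_first, hv, ih]

-- A's first loop from the initial state, against the filtered enumeration.
theorem pvA_first_eq (img : List (List Int)) (verde : Int) (l : List (Int × List Int)) :
    pvA_first img verde l 0 none =
      match l.filter (fun p => decide (verde ∈ p.2)) with
      | [] => (none, none)
      | [p] => (some (p.1, ((PySem.List.index? p.2 verde).getD 0 : Nat)), none)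
      | p :: q :: _ => (some (p.1, ((PySem.List.index? p.2 verde).getD 0 : Nat)),
                        some ((PySem.List.slice img (some p.1) (some q.1)).length : Int)) := by
  induction l with
  | nil => simp [pvA_first]
  | cons h rest ih =>
    obtain ⟨i, e⟩ := h
    by_cases hv : verde ∈ e
    · have h1 : (0 : Int) + 1 = 1 := rfl
      simp only [pvA_first, hv, true_and, if_pos, List.filter_cons, decide_true, h1]
      rw [pvA_first_state1]
      cases rest.filter (fun p => decide (verde ∈ p.2)) <;> simp
    · simp [pvA_first, hv, ih]

-- range(0,n) filtered by 'a ≤ j and (j-a) % s == 0' IS the stride range(a,n,s)  (0 ≤ a, 0 < s)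
theorem pvRange_filter_stride (a n s : Int) (ha : 0 ≤ a) (hs : 0 < s) :
    (PySem.List.pyRange 0 n 1).filter
        (fun j => decide (a ≤ j ∧ PySem.Int.mod (j - a) s = 0)) =
      PySem.List.pyRange a n s := by
  have hmem : ∀ x : Int,
      x ∈ (PySem.List.pyRange 0 n 1).filter
        (fun j => decide (a ≤ j ∧ PySem.Int.mod (j - a) s = 0)) ↔ x ∈ PySem.List.pyRange a n s := by
    intro x
    rw [List.mem_filter, PySem.List.mem_pyRange_one, PySem.List.mem_pyRange_iff_of_pos hs]
    rw [decide_eq_true_eq, PySem.Int.mod_eq_zero_iff_dvd]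
    constructor
    · rintro ⟨⟨_, hxn⟩, hax, hdvd⟩; exact ⟨hax, hxn, hdvd⟩
    · rintro ⟨hax, hxn, hdvd⟩; exact ⟨⟨le_trans ha hax, hxn⟩, hax, hdvd⟩
  have hpw1 : ((PySem.List.pyRange 0 n 1).filter
      (fun j => decide (a ≤ j ∧ PySem.Int.mod (j - a) s = 0))).Pairwise (· < ·) :=
    (PySem.List.pairwise_lt_pyRange_one 0 n).sublist List.filter_sublist
  have hpw2 : (PySem.List.pyRange a n s).Pairwise (· < ·) := by
    rw [PySem.List.pyRange_of_pos a n hs]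
    refine List.Pairwise.map _ (fun i j hij => ?_) (List.pairwise_lt_range)
    have := mul_lt_mul_of_pos_left (by exact_mod_cast hij : (i : Int) < j) hs
    omega
  exact List.Perm.eq_of_pairwise (fun a b _ _ h1 h2 => absurd h2 (not_lt.2 (le_of_lt h1)))
    hpw1 hpw2
    (List.perm_of_nodup_nodup_toFinset_eq hpw1.nodup hpw2.nodup
      (by ext x; simp only [List.mem_toFinset]; exact hmem x))

-- B's full-enumeration modular filter computes A's stride-loop filter.
theorem pvStrided_filter {α : Type} [DecidableEq α] (xs : List α) (d : α) (a s : Int)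
    (ha : 0 ≤ a) (hs : 0 < s) (P : Int → α → Prop) [inst : ∀ i x, Decidable (P i x)] :
    ((PySem.List.enumerate xs 0).filter
        (fun p => decide (a ≤ p.1 ∧ PySem.Int.mod (p.1 - a) s = 0 ∧ P p.1 p.2))).map (·.1)
      = (PySem.List.pyRange a (xs.length : Int) s).filter
        (fun j => decide (P j (PySem.List.pyGetD xs j d))) := by
  rw [show PySem.List.enumerate xs 0 = PySem.List.enumerate xs from rfl,
      PySem.List.enumerate_eq_map_pyRange xs d, List.filter_map, List.map_map]
  have hfst : ((·.1) ∘ fun j : Int => (j, PySem.List.pyGetD xs j d)) = id := rfl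
  rw [hfst, List.map_id]
  have hsplit : ∀ l : List Int,
      l.filter ((fun p : Int × α => decide (a ≤ p.1 ∧ PySem.Int.mod (p.1 - a) s = 0 ∧ P p.1 p.2)) ∘
                 fun j => (j, PySem.List.pyGetD xs j d)) =
      (l.filter (fun j => decide (a ≤ j ∧ PySem.Int.mod (j - a) s = 0))).filter
        (fun j => decide (P j (PySem.List.pyGetD xs j d))) := by
    intro l
    rw [List.filter_filter]
    apply List.filter_congr
    intro j _
    simp only [Function.comp, Bool.decide_and, Bool.and_comm, Bool.and_assoc]
  rw [hsplit]
  simp only [PySem.List.len_eq]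
  rw [pvRange_filter_stride a (xs.length : Int) s ha hs]

-- ===== VERDICT (by name: the statement is the Claim_ definition above) =====
theorem trova_griglia_spec : Claim_equal_trova_griglia := by
  intro img verde k _ _
  unfold Spec_trova_griglia trova_griglia trova_griglia_alt
  rw [pvA_first_eq]
  cases hf : (PySem.List.enumerate img 0).filter (fun p => decide (verde ∈ p.2)) with
  | nil => simp
  | cons p tl =>
    cases tl with
    | nil => simp
    | cons q rest =>
      have hsub : (p :: q :: rest).Sublist (PySem.List.enumerate img 0) := by
        rw [← hf]; exact List.filter_sublist
      have hp : p ∈ PySem.List.enumerate img 0 := hsub.subset (by simp)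
      have hq : q ∈ PySem.List.enumerate img 0 := hsub.subset (by simp)
      have hpair : (p :: q :: rest).Pairwise (fun a b => a.1 < b.1) :=
        (PySem.List.pairwise_lt_enumerate img 0).sublist hsub
      have hlt : p.1 < q.1 := (List.pairwise_cons.1 hpair).1 q (by simp)
      obtain ⟨kp, hkp, hpe⟩ := (PySem.List.mem_enumerate_iff _ _ _).1 hp
      obtain ⟨kq, hkq, hqe⟩ := (PySem.List.mem_enumerate_iff _ _ _).1 hq
      subst hpe; subst hqe
      simp only [zero_add] at hlt ⊢
      have hrow : PySem.List.pyGetD img ((kp : Nat) : Int) ([] : List Int) = img[kp] := by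
        simp [PySem.List.pyGetD_natCast, List.getD_eq_getElem?_getD, hkp]
      have hstep : ((PySem.List.slice img (some (kp : Int)) (some (kq : Int))).length : Int)
          = (kq : Int) - (kp : Int) := by
        rw [PySem.List.slice_natCast]
        have hkpq : kp ≤ kq := by exact_mod_cast le_of_lt hlt
        simp [List.length_take, List.length_drop]
        omega
      have hsp : (0 : Int) < (kq : Int) - (kp : Int) := by omega
      have hxnn : (0 : Int) ≤ (((PySem.List.index? (PySem.List.pyGetD img ((kp : Nat) : Int) []) verde).getD 0 : Nat) : Int) := by positivity
      have hynn : (0 : Int) ≤ ((kp : Nat) : Int) := by positivity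
      simp only [hstep, List.map_cons, hrow]
      rw [PySem.List.foldl_append_ite_eq_filter, PySem.List.foldl_append_ite_eq_filter]
      rw [pvStrided_filter (img[kp]) (0 : Int) _ _ (by rw [hrow] at hxnn; exact hxnn) hsp
            (fun x v => v = verde ∧ x + ((kq : Int) - (kp : Int)) * k <
              ((img[kp] : List Int).length : Int)),
          pvStrided_filter img ([] : List Int) _ _ hynn hsp
            (fun y r => PySem.List.pyGetD r
                (((PySem.List.index? (img[kp] : List Int) verde).getD 0 : Nat) : Int) 0 = verde ∧
              y + ((kq : Int) - (kp : Int)) * k < (img.length : Int))]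
      simp
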